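-- pv_equiv track=rewrite | github.com/ertuchill/world-cup-draw-analysis | app.py | check_valid_group
-- ===== SOURCE A (Python) =====
-- def check_valid_group(group, new_team):
--     """
--     Grup kurallarını kontrol eder.
--     new_team: Eklenecek aday takım
--     """
--     eu_count = 0
--
--     # Yeni takımın yasaklı kıtaları (Set kümesi olarak)
--     new_team_continents = set(new_team['kitalar'])
--
--     # 1. AVRUPA SAYISI KONTROLÜ
--     # Gruptaki mevcut Avrupalıları say
--     for member in group:
--         if "EU" in member['kitalar']:
--             eu_count += 1
--
--     # Eğer yeni takım Avrupalıysa (veya Avrupa ihtimali varsa) ve kota dolduysa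
--     if "EU" in new_team_continents and eu_count >= 2:
--         return False
--
--     # 2. KITA ÇAKIŞMASI KONTROLÜ (Composite Constraint)
--     for member in group:
--         member_continents = set(member['kitalar'])
--
--         # İki kümenin kesişimini al (Ortak kıtalar)
--         intersection = new_team_continents.intersection(member_continents)
--
--         # Eğer ortak kıta varsa:
--         if intersection:
--             # Eğer ortak olan tek şey Avrupa ise sorun yok (Max 2 kuralı zaten yukarıda bakıldı)
--             if intersection == {"EU"}:
--                 continue
--             # Avrupa dışında bir çakışma varsa (Örn: NA ile NA, veya [NA,AF] ile NA) -> YASAK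
--             else:
--                 return False
--
--     return True
-- ===== SOURCE B (Python) =====
-- def check_valid_group(group, new_team):
--     new_cont = set(new_team['kitalar'])
--     new_non_eu = new_cont - {"EU"}
--     eu_count = 0
--     occupied = set()
--     for member in group:
--         mc = member['kitalar']
--         if "EU" in mc:
--             eu_count += 1
--         occupied.update(c for c in mc if c != "EU")
--     return not (("EU" in new_cont and eu_count >= 2) or bool(new_non_eu & occupied))
-- ===== Notes on version B (the rewrite author's own statement) =====
-- stated objective: simpler
-- what changed: Replaces A's second per-member pass with intersection-and-equality tests on each member by a single aggregated pass that counts EU members and builds one occupied non-EU continent set, finishing with one disjointness test.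
import Mathlib
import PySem

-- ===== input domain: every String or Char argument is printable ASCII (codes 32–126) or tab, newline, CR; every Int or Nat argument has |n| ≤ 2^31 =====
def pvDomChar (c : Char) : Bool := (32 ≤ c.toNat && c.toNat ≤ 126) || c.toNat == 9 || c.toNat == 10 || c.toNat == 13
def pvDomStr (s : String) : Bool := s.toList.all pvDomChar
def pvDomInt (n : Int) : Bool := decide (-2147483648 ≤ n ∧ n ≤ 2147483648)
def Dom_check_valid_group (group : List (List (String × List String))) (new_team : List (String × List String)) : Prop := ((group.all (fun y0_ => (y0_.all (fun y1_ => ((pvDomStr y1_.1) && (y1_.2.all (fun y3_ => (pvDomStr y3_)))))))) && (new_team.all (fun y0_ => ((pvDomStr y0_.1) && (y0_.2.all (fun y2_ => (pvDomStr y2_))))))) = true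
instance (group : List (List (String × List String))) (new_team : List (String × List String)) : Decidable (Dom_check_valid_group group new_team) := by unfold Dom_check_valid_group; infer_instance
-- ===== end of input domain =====

-- B replaces A's per-member intersection tests by one aggregated pass (EU count + occupied non-EU set) and a single disjointness test; objective: simpler.

-- d['kitalar'] : total form of the dict access, used under Pre_ (key present)
def pvKitalar (d : List (String × List String)) : List String :=
  (d.lookup "kitalar").getD []

-- ===== PORT A =====
-- A's second loop: per-member intersection check, early return False
def pvALoop (ntc : PySem.Set String) : List (List (String × List String)) → Bool
  | [] => true
  | member :: rest =>
    let member_continents := PySem.Set.ofList (pvKitalar member)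
    let inter := PySem.Set.inter ntc member_continents
    if !inter.isEmpty then
      if PySem.Set.equal inter (PySem.Set.ofList ["EU"]) then pvALoop ntc rest
      else false
    else pvALoop ntc rest

def check_valid_group (group : List (List (String × List String))) (new_team : List (String × List String)) : Bool :=
  let eu_count : Int := group.foldl (fun c member => if (pvKitalar member).contains "EU" then c + 1 else c) 0
  let new_team_continents := PySem.Set.ofList (pvKitalar new_team)
  if PySem.Set.contains new_team_continents "EU" && decide (2 ≤ eu_count) then false
  else pvALoop new_team_continents group

-- ===== PORT B =====
def check_valid_group_alt (group : List (List (String × List String))) (new_team : List (String × List String)) : Bool :=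
  let new_cont := PySem.Set.ofList (pvKitalar new_team)
  let new_non_eu := PySem.Set.diff new_cont ["EU"]
  let acc := group.foldl
    (fun (p : Int × PySem.Set String) member =>
      let mc := pvKitalar member
      ((if mc.contains "EU" then p.1 + 1 else p.1),
       PySem.Set.update p.2 (mc.filter (fun c => c != "EU"))))
    (0, PySem.Set.empty)
  !((PySem.Set.contains new_cont "EU" && decide (2 ≤ acc.1)) || !(PySem.Set.inter new_non_eu acc.2).isEmpty)

-- ===== PRECONDITION & SPEC =====
-- Pre_ excludes exactly the inputs where Python raises KeyError: a team dict missing the 'kitalar' key.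
def Pre_check_valid_group (group : List (List (String × List String))) (new_team : List (String × List String)) : Prop :=
  ((new_team.lookup "kitalar").isSome && group.all (fun m => (m.lookup "kitalar").isSome)) = true
instance (group : List (List (String × List String))) (new_team : List (String × List String)) : Decidable (Pre_check_valid_group group new_team) := by unfold Pre_check_valid_group; infer_instance
def pvWitness_check_valid_group : (List (List (String × List String))) × (List (String × List String)) :=
  ([[("kitalar", ["NA"])]], [("kitalar", ["EU", "SA"])])

def Spec_check_valid_group (group : List (List (String × List String))) (new_team : List (String × List String)) (out : Bool) : Prop := out = check_valid_group_alt group new_team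
instance (group : List (List (String × List String))) (new_team : List (String × List String)) (out : Bool) : Decidable (Spec_check_valid_group group new_team out) := by unfold Spec_check_valid_group; infer_instance

-- ===== CLAIM (what is proved, stated in full; the proofs are below) =====
def Claim_equal_check_valid_group : Prop := ∀ (group : List (List (String × List String))) (new_team : List (String × List String)), Dom_check_valid_group group new_team → Pre_check_valid_group group new_team → Spec_check_valid_group group new_team (check_valid_group group new_team)

-- ===== LEMMAS AND PROOFS =====

-- B's pair fold splits into the count fold and the occupied-set fold
theorem pv_fold_split (g : List (List (String × List String))) (c : Int) (s : PySem.Set String) :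
    g.foldl
      (fun (p : Int × PySem.Set String) member =>
        let mc := pvKitalar member
        ((if mc.contains "EU" then p.1 + 1 else p.1),
         PySem.Set.update p.2 (mc.filter (fun c => c != "EU"))))
      (c, s)
    = (g.foldl (fun c member => if (pvKitalar member).contains "EU" then c + 1 else c) c,
       g.foldl (fun s member => PySem.Set.update s ((pvKitalar member).filter (fun c => c != "EU"))) s) := by
  induction g generalizing c s with
  | nil => rfl
  | cons m rest ih => simp only [List.foldl_cons]; split <;> exact ih _ _

-- membership in the occupied-set fold
theorem pv_mem_occ (g : List (List (String × List String))) (s : PySem.Set String) (x : String) :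
    x ∈ g.foldl (fun s member => PySem.Set.update s ((pvKitalar member).filter (fun c => c != "EU"))) s
    ↔ x ∈ s ∨ ∃ m ∈ g, x ∈ pvKitalar m ∧ x ≠ "EU" := by
  induction g generalizing s with
  | nil => simp
  | cons m rest ih =>
    simp only [List.foldl_cons, ih, PySem.Set.mem_update, List.mem_filter, List.mem_cons,
      bne_iff_ne, ne_eq]
    constructor
    · rintro ((h | ⟨h1, h2⟩) | ⟨m', hm', h1, h2⟩)
      · exact Or.inl h
      · exact Or.inr ⟨m, Or.inl rfl, h1, h2⟩
      · exact Or.inr ⟨m', Or.inr hm', h1, h2⟩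
    · rintro (h | ⟨m', rfl | hm', h1, h2⟩)
      · exact Or.inl (Or.inl h)
      · exact Or.inl (Or.inr ⟨h1, h2⟩)
      · exact Or.inr ⟨m', hm', h1, h2⟩

-- A's per-member test holds iff every continent shared with the member is "EU"
theorem pv_member_ok (ntc : PySem.Set String) (mc : List String) :
    ((PySem.Set.inter ntc (PySem.Set.ofList mc)).isEmpty = true
      ∨ PySem.Set.equal (PySem.Set.inter ntc (PySem.Set.ofList mc)) (PySem.Set.ofList ["EU"]) = true)
    ↔ ∀ x, x ∈ ntc → x ∈ mc → x = "EU" := by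
  constructor
  · rintro (h | h)
    · intro x hx hx'
      rw [List.isEmpty_iff] at h
      exfalso
      have hmem : x ∈ PySem.Set.inter ntc (PySem.Set.ofList mc) := by
        rw [PySem.Set.mem_inter, PySem.Set.mem_ofList]; exact ⟨hx, hx'⟩
      rw [h] at hmem
      exact List.not_mem_nil hmem
    · intro x hx hx'
      rw [PySem.Set.equal_iff] at h
      have hmem := (h x).mp (by rw [PySem.Set.mem_inter, PySem.Set.mem_ofList]; exact ⟨hx, hx'⟩)
      rw [PySem.Set.mem_ofList] at hmem
      simpa using hmem
  · intro h
    by_cases heu : "EU" ∈ ntc ∧ "EU" ∈ mc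
    · right
      rw [PySem.Set.equal_iff]
      intro x
      rw [PySem.Set.mem_inter, PySem.Set.mem_ofList, PySem.Set.mem_ofList]
      constructor
      · rintro ⟨h1, h2⟩; simpa using h x h1 h2
      · intro hx
        simp only [List.mem_singleton] at hx
        subst hx; exact heu
    · left
      rw [List.isEmpty_iff, List.eq_nil_iff_forall_not_mem]
      intro x hx
      rw [PySem.Set.mem_inter, PySem.Set.mem_ofList] at hx
      have hx' := h x hx.1 hx.2
      subst hx'
      exact heu ⟨hx.1, hx.2⟩

-- A's loop as a List.all over the same per-member test
theorem pv_aloop_eq_all (ntc : PySem.Set String) (g : List (List (String × List String))) :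
    pvALoop ntc g
    = g.all (fun member =>
        (PySem.Set.inter ntc (PySem.Set.ofList (pvKitalar member))).isEmpty
        || PySem.Set.equal (PySem.Set.inter ntc (PySem.Set.ofList (pvKitalar member))) (PySem.Set.ofList ["EU"])) := by
  induction g with
  | nil => rfl
  | cons m rest ih =>
    simp only [pvALoop, List.all_cons, ← ih]
    cases hi : (PySem.Set.inter ntc (PySem.Set.ofList (pvKitalar m))).isEmpty <;>
      cases he : PySem.Set.equal (PySem.Set.inter ntc (PySem.Set.ofList (pvKitalar m))) (PySem.Set.ofList ["EU"]) <;>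
        simp [*]

-- the two loop results over the whole group agree
theorem pv_loops_agree (g : List (List (String × List String))) (ncl : List String) :
    pvALoop (PySem.Set.ofList ncl) g
    = (PySem.Set.inter (PySem.Set.diff (PySem.Set.ofList ncl) ["EU"])
        (g.foldl (fun s member => PySem.Set.update s ((pvKitalar member).filter (fun c => c != "EU"))) PySem.Set.empty)).isEmpty := by
  rw [pv_aloop_eq_all, Bool.eq_iff_iff]
  simp only [List.all_eq_true, Bool.or_eq_true]
  rw [List.isEmpty_iff, List.eq_nil_iff_forall_not_mem]
  constructor
  · intro h x hx
    rw [PySem.Set.mem_inter, PySem.Set.mem_diff, pv_mem_occ] at hx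
    obtain ⟨⟨hn, hne⟩, (he | ⟨m, hm, h1, h2⟩)⟩ := hx
    · simp [PySem.Set.empty] at he
    · exact h2 ((pv_member_ok _ _).mp (h m hm) x hn h1)
  · intro h m hm
    refine (pv_member_ok (PySem.Set.ofList ncl) (pvKitalar m)).mpr ?_
    intro x hx hx'
    by_contra hne
    exact h x (by
      rw [PySem.Set.mem_inter, PySem.Set.mem_diff, pv_mem_occ]
      exact ⟨⟨hx, by simpa using hne⟩, Or.inr ⟨m, hm, hx', hne⟩⟩)

-- ===== VERDICT (by name: the statement is the Claim_ definition above) =====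
theorem check_valid_group_spec : Claim_equal_check_valid_group := by
  intro group new_team _ _
  unfold Spec_check_valid_group check_valid_group check_valid_group_alt
  simp only [pv_fold_split, pv_loops_agree]
  cases hg : (PySem.Set.contains (PySem.Set.ofList (pvKitalar new_team)) "EU"
      && decide (2 ≤ group.foldl (fun c member => if (pvKitalar member).contains "EU" then c + 1 else c) (0:Int))) <;>
    simp [*]
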